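-- pv_equiv track=rewrite | github.com/karolinaranjo/CourtDecision-Annotator | kutils.py | detect_roman_numerals
-- ===== SOURCE A (Python) =====
-- def detect_roman_numerals(text):
--     '''
--     Takes a string and outputs a list of words composed solely of
--     characters that represent Roman numerals.
--
--     Parameters
--     ----------
--     text : str
--         The input text to be analyzed.
--
--     Returns
--     -------
--     roman_numerals : List
--         A list of words from the input text that contain only characters representing Roman numerals.
--     '''
--     numerals = ['M', 'D', 'C', 'L', 'X', 'V', 'I']
--     roman_numerals = []
--     words = text.split()
--     for word in words:
--         if all(char in numerals for char in word):
--             roman_numerals.append(word)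
--     return roman_numerals
-- ===== SOURCE B (Python) =====
-- def detect_roman_numerals(text):
--     roman_numerals = []
--     cur = []
--     ok = True
--     for ch in text:
--         if ch.isspace():
--             if cur and ok:
--                 roman_numerals.append(''.join(cur))
--             cur = []
--             ok = True
--         else:
--             cur.append(ch)
--             ok = ok and ch in 'MDCLXVI'
--     if cur and ok:
--         roman_numerals.append(''.join(cur))
--     return roman_numerals
-- ===== Notes on version B (the rewrite author's own statement) =====
-- stated objective: alternative
-- what changed: Replaced split()-then-filter over whole words by a single character-level scan that builds the current token and tracks an all-Roman flag in one pass, emitting tokens at whitespace boundaries.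
import Mathlib
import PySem

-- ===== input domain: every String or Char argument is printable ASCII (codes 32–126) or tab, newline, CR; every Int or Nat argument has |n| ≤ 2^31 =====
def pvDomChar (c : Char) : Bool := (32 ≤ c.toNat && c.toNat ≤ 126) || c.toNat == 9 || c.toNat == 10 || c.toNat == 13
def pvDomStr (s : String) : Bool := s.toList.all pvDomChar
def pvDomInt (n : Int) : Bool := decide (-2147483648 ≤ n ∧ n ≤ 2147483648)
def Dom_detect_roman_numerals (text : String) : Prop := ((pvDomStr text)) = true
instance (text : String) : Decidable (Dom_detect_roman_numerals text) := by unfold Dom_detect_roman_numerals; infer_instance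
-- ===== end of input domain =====

-- B replaces split()-then-filter by a single character-level scan with a current-token buffer
-- and an all-Roman flag (alternative decomposition, same cost).

-- ===== PORT A =====
def detect_roman_numerals (text : String) : List String :=
  let numerals : List Char := ['M', 'D', 'C', 'L', 'X', 'V', 'I']
  let words := PySem.Str.split₀ text
  words.foldl
    (fun roman_numerals word =>
      if word.toList.all (fun c => numerals.contains c) then roman_numerals ++ [word]
      else roman_numerals)
    []

-- ===== PORT B =====
-- state: (output so far, current token in REVERSE char order, ok flag); one step per character
def pvAltStep (st : List String × List Char × Bool) (c : Char) : List String × List Char × Bool :=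
  let (out, cur, ok) := st
  if PySem.Chars.isspace c then
    if cur ≠ [] ∧ ok = true then (out ++ [String.ofList cur.reverse], [], true)
    else (out, [], true)
  else
    (out, c :: cur, ok && ("MDCLXVI".toList.contains c))

def detect_roman_numerals_alt (text : String) : List String :=
  let st := text.toList.foldl pvAltStep ([], [], true)
  if st.2.1 ≠ [] ∧ st.2.2 = true then st.1 ++ [String.ofList st.2.1.reverse] else st.1

-- ===== PRECONDITION & SPEC =====
def Spec_detect_roman_numerals (text : String) (out : List String) : Prop := out = detect_roman_numerals_alt text
instance (text : String) (out : List String) : Decidable (Spec_detect_roman_numerals text out) := by unfold Spec_detect_roman_numerals; infer_instance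

-- ===== CLAIM (what is proved, stated in full; the proofs are below) =====
def Claim_equal_detect_roman_numerals : Prop := ∀ (text : String), Dom_detect_roman_numerals text → Spec_detect_roman_numerals text (detect_roman_numerals text)

-- ===== LEMMAS AND PROOFS =====

def pvRoman (c : Char) : Bool := ("MDCLXVI".toList.contains c)

def pvP (w : List Char) : Bool := w.all pvRoman

lemma pv_go_acc (s cur acc) :
    PySem.Chars.split₀.go s cur acc = acc.reverse ++ PySem.Chars.split₀.go s cur [] := by
  induction s generalizing cur acc with
  | nil => simp [PySem.Chars.split₀.go]; split_ifs <;> simp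
  | cons c rest ih =>
    simp only [PySem.Chars.split₀.go]
    split_ifs with h1 h2
    · rw [ih [] acc]
    · rw [ih [] (cur.reverse :: acc), ih [] [cur.reverse]]; simp
    · exact ih (c :: cur) acc

lemma pv_scan (s : List Char) (cur : List Char) (out : List String) :
    (let st := s.foldl pvAltStep (out, cur, cur.all pvRoman)
     if st.2.1 ≠ [] ∧ st.2.2 = true then st.1 ++ [String.ofList st.2.1.reverse] else st.1)
    = out ++ ((PySem.Chars.split₀.go s cur []).filter pvP).map String.ofList := by
  induction s generalizing cur out with
  | nil =>
    simp only [List.foldl_nil, PySem.Chars.split₀.go]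
    by_cases hc : cur = []
    · subst hc; simp
    · have hne : cur.isEmpty = false := by simpa [List.isEmpty_iff] using hc
      by_cases hk : cur.all pvRoman = true
      · simp [hne, hc, hk, pvP, List.all_reverse]
      · simp [hne, hc, hk, pvP, List.all_reverse]
  | cons c rest ih =>
    simp only [List.foldl_cons, PySem.Chars.split₀.go]
    by_cases hs : PySem.Chars.isspace c = true
    · by_cases hc : cur = []
      · subst hc
        simp only [pvAltStep, hs, if_true, List.isEmpty_nil, ne_eq, not_true_eq_false,
          false_and, if_false]
        simpa using ih [] out
      · have hne : cur.isEmpty = false := by simpa [List.isEmpty_iff] using hc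
        by_cases hk : cur.all pvRoman = true
        · simp only [pvAltStep, hs, if_true, hc, hne, hk, ne_eq, not_false_iff, true_and,
            if_true, Bool.false_eq_true, if_false]
          rw [pv_go_acc rest [] [cur.reverse]]
          have h2 := ih [] (out ++ [String.ofList cur.reverse])
          simp only [List.all_nil] at h2
          simp only [ne_eq] at h2 ⊢
          rw [h2]
          have hp : pvP cur.reverse = true := by simpa [pvP, List.all_reverse] using hk
          simp [hp, List.append_assoc]
        · simp only [pvAltStep, hs, if_true, hc, hne, hk, ne_eq, not_false_iff,
            Bool.false_eq_true, and_false, if_false]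
          rw [pv_go_acc rest [] [cur.reverse]]
          have h2 := ih [] out
          simp only [List.all_nil] at h2
          simp only [ne_eq] at h2 ⊢
          rw [h2]
          have hp : pvP cur.reverse = false := by
            simp only [pvP, List.all_reverse]
            simpa using hk
          simp [hp]
    · have hs' : PySem.Chars.isspace c = false := by simpa using hs
      simp only [pvAltStep, hs', Bool.false_eq_true, if_false]
      have hall : (cur.all pvRoman && pvRoman c) = (c :: cur).all pvRoman := by
        simp [List.all_cons, Bool.and_comm]
      rw [show (out, c :: cur, cur.all pvRoman && ("MDCLXVI".toList.contains c))
            = (out, c :: cur, (c :: cur).all pvRoman) by rw [← hall]; rfl]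
      exact ih (c :: cur) out

-- ===== VERDICT (by name: the statement is the Claim_ definition above) =====
theorem detect_roman_numerals_spec : Claim_equal_detect_roman_numerals := by
  intro text _
  simp only [Spec_detect_roman_numerals, detect_roman_numerals, detect_roman_numerals_alt]
  have hB := pv_scan text.toList [] []
  simp only [List.all_nil, List.nil_append] at hB
  rw [hB]
  rw [PySem.Str.split₀, PySem.Chars.split₀,
    PySem.List.foldl_append_if_eq_filter
      (fun (word : String) => word.toList.all fun c => (['M','D','C','L','X','V','I'] : List Char).contains c),
    List.nil_append, List.filter_map]
  congr 1
  apply List.filter_congr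
  intro w _
  have hms : ∀ c : Char, ((['M','D','C','L','X','V','I'] : List Char).contains c) = pvRoman c := by
    intro c
    rw [pvRoman, show "MDCLXVI".toList = ['M','D','C','L','X','V','I'] from by decide]
  simp only [Function.comp_apply, String.toList_ofList, pvP]
  exact List.all_congr rfl hms
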